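-- pv_equiv track=rewrite | github.com/raffaelecheula/catalyst_opt_tools | catalyst_opt_tools/adsorption.py | get_adsorption_sites
-- ===== SOURCE A (Python) =====
-- from itertools import combinations
--
-- def get_adsorption_sites(
--     indices_surf: list,
--     edges_surf: list,
-- ) -> dict:
--     """
--     Get adsorption sites for the surface.
--     """
--     # Prepare sites dictionary.
--     sites_dict = {}
--     indices_surf = sorted(indices_surf)
--     edges_set = set(tuple(sorted(edge)) for edge in edges_surf)
--     # Get top sites.
--     sites_dict["top"] = [[aa] for aa in indices_surf]
--     # Get bridge sites.
--     sites_dict["brg"] = [[aa, bb] for (aa, bb) in edges_surf]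
--     # Get 3-fold hollow sites.
--     sites_dict["3fh"] = [
--         [aa, bb, cc] for (aa, bb, cc) in combinations(indices_surf, 3)
--         if {(aa, bb), (bb, cc), (aa, cc)}.issubset(edges_set)
--     ]
--     # Get 4-fold hollow sites.
--     sites_dict["4fh"] = [
--         list(indices) for indices in combinations(indices_surf, 4)
--         if sum((aa, bb) in edges_set for aa, bb in combinations(indices, 2)) == 4
--         and all(
--             sum((aa, bb) in edges_set or (bb, aa) in edges_set for bb in indices) == 2
--             for aa in indices
--         )
--     ]
--     # Reorder 4-fold hollow sites to have closed loops.
--     sites_dict["4fh"] = [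
--         [aa, bb, cc, dd] if (bb, cc) in edges_set else [aa, bb, dd, cc]
--         for (aa, bb, cc, dd) in sites_dict["4fh"]
--     ]
--     # Return the sites dictionary.
--     return sites_dict
-- ===== SOURCE B (Python) =====
-- def get_adsorption_sites(
--     indices_surf: list,
--     edges_surf: list,
-- ) -> dict:
--     """
--     Get adsorption sites for the surface (neighbourhood-driven enumeration).
--     """
--     idx = sorted(indices_surf)
--     vset = set(idx)
--     es = {(u, v) if u <= v else (v, u) for (u, v) in edges_surf}
--
--     def adjacent(u, v):
--         return ((u, v) if u <= v else (v, u)) in es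
--
--     # 3-fold hollows are the triangles of the surface graph: grow each
--     # surface edge by a common neighbour larger than both endpoints.
--     tri = sorted({
--         (u, v, w)
--         for (u, v) in es if u in vset and v in vset
--         for w in idx
--         if v < w and adjacent(u, w) and adjacent(v, w)
--     })
--     # 4-fold hollows are the induced 4-cycles: pick a non-adjacent diagonal
--     # pair, then a non-adjacent pair of their common neighbours.
--     cand = set()
--     for k, u in enumerate(idx):
--         for v in idx[k + 1:]:
--             if not adjacent(u, v):
--                 common = [w for w in idx if adjacent(u, w) and adjacent(v, w)]
--                 for i, x in enumerate(common):
--                     for y in common[i + 1:]: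
--                         if not adjacent(x, y):
--                             cand.add(tuple(sorted((u, v, x, y))))
--     return {
--         "top": [[v] for v in idx],
--         "brg": [[u, v] for (u, v) in edges_surf],
--         "3fh": [list(t) for t in tri],
--         "4fh": [
--             [a, b, c, d] if adjacent(b, c) else [a, b, d, c]
--             for (a, b, c, d) in sorted(cand)
--         ],
--     }
-- ===== Notes on version B (the rewrite author's own statement) =====
-- stated objective: faster
-- what changed: A filters all C(n,3) and C(n,4) index combinations against the edge set; B enumerates triangles by growing each surface edge with a larger common neighbour and enumerates induced 4-cycles as a non-adjacent diagonal pair plus a non-adjacent pair of their common neighbours, collecting into sets and sorting to restore lexicographic order. Pre_ excludes duplicate surface indices (combinations then yields repeated/degenerate sites, an artefact of enumerating a list with duplicates) and self-loop edges (A's within-quad degree count then counts the loop), both degenerate for a surface graph.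
import Mathlib
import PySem

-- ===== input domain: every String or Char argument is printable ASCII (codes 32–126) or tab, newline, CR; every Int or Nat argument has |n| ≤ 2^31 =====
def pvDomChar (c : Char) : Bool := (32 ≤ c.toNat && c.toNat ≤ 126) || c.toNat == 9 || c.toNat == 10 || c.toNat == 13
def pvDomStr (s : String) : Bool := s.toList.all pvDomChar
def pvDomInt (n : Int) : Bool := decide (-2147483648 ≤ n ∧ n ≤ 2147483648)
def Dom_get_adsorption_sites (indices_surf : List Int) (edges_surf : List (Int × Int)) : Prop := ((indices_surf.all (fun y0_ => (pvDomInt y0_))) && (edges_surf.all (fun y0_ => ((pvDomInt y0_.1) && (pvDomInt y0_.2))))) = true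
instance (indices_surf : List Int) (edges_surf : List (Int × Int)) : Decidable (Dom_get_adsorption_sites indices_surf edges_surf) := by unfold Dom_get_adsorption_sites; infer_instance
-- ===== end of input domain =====

-- B enumerates triangles from the edges and induced 4-cycles from diagonal
-- pairs with common neighbours, instead of filtering all 3-/4-combinations
-- of the surface indices (objective: faster).

-- ===== PORT A =====

-- tuple(sorted((x, y))) on a 2-tuple: exact (stable ascending sort of two elements).
def pvSortPair (e : Int × Int) : Int × Int := if e.1 ≤ e.2 then e else (e.2, e.1)

-- Python bool used as an int in sums.
def pvB2i (b : Bool) : Int := if b then 1 else 0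

-- itertools.combinations(l, 2/3/4) in Python's lexicographic-by-position order.
def pvComb2 : List Int → List (Int × Int)
  | [] => []
  | x :: xs => xs.map (fun y => (x, y)) ++ pvComb2 xs

def pvComb3 : List Int → List (Int × Int × Int)
  | [] => []
  | x :: xs => (pvComb2 xs).map (fun p => (x, p.1, p.2)) ++ pvComb3 xs

def pvComb4 : List Int → List (Int × Int × Int × Int)
  | [] => []
  | x :: xs => (pvComb3 xs).map (fun t => (x, t.1, t.2.1, t.2.2)) ++ pvComb4 xs

-- A's 4-fold predicate: 4 edges among the 6 pairs, and every vertex of the quad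
-- sees exactly 2 of the quad's entries (both tuple orders checked, as in A).
def pvQA (es : PySem.Set (Int × Int)) (q : Int × Int × Int × Int) : Bool :=
  let l : List Int := [q.1, q.2.1, q.2.2.1, q.2.2.2]
  (((pvComb2 l).map (fun p => pvB2i (PySem.Set.contains es p))).sum == 4)
    && l.all (fun aa =>
        ((l.map (fun bb => pvB2i (PySem.Set.contains es (aa, bb) || PySem.Set.contains es (bb, aa)))).sum == 2))

-- A's reorder of a 4-fold site (the stored entries always have length 4,
-- so the catch-all branch of the unpacking match is never taken).
def pvReorder (es : PySem.Set (Int × Int)) (s : List Int) : List Int :=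
  match s with
  | [aa, bb, cc, dd] =>
      if PySem.Set.contains es (bb, cc) then [aa, bb, cc, dd] else [aa, bb, dd, cc]
  | _ => s

def get_adsorption_sites (indices_surf : List Int) (edges_surf : List (Int × Int)) : List (String × List (List Int)) :=
  let indices := PySem.List.sorted indices_surf (fun x => x) false
  let es : PySem.Set (Int × Int) := PySem.Set.ofList (edges_surf.map pvSortPair)
  let d : PySem.Dict String (List (List Int)) := PySem.Dict.empty
  let d := d.insert "top" (indices.map (fun aa => [aa]))
  let d := d.insert "brg" (edges_surf.map (fun e => [e.1, e.2]))
  let d := d.insert "3fh"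
    (((pvComb3 indices).filter (fun t =>
        PySem.Set.issubset (PySem.Set.ofList [(t.1, t.2.1), (t.2.1, t.2.2), (t.1, t.2.2)]) es)).map
      (fun t => [t.1, t.2.1, t.2.2]))
  let d := d.insert "4fh"
    (((pvComb4 indices).filter (pvQA es)).map (fun q => [q.1, q.2.1, q.2.2.1, q.2.2.2]))
  -- sites_dict["4fh"] = [reorder ...]; the key is present, so get? is some.
  let d := d.insert "4fh" (((d.get? "4fh").getD []).map (pvReorder es))
  d.items

-- ===== PORT B =====

-- adjacent(u, v) = ((u, v) if u <= v else (v, u)) in es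
def pvAdj (es : PySem.Set (Int × Int)) (u v : Int) : Bool :=
  PySem.Set.contains es (if u ≤ v then (u, v) else (v, u))

-- {(u, v, w) for (u, v) in es if u in vset and v in vset
--            for w in idx if v < w and adjacent(u, w) and adjacent(v, w)}
-- (sites kept as lists; Python's 3-tuples compare the same way)
def pvTriCand (es : PySem.Set (Int × Int)) (vset : PySem.Set Int) (idx : List Int) :
    List (List Int) :=
  (es : List (Int × Int)).flatMap (fun e =>
    if PySem.Set.contains vset e.1 && PySem.Set.contains vset e.2 then
      (idx.filter (fun w => decide (e.2 < w) && pvAdj es e.1 w && pvAdj es e.2 w)).map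
        (fun w => [e.1, e.2, w])
    else [])

-- for k, u in enumerate(l): for v in l[k+1:]: yield (u, v)
def pvPairsB : List Int → List (Int × Int)
  | [] => []
  | u :: rest => rest.map (fun v => (u, v)) ++ pvPairsB rest

-- the cand loop nest: a non-adjacent diagonal pair (u, v), then a
-- non-adjacent pair (x, y) of their common neighbours, added as sorted((u,v,x,y))
def pvQuadCand (es : PySem.Set (Int × Int)) (idx : List Int) : List (List Int) :=
  (pvPairsB idx).flatMap (fun p =>
    if pvAdj es p.1 p.2 then []
    else
      (pvPairsB (idx.filter (fun w => pvAdj es p.1 w && pvAdj es p.2 w))).flatMap (fun q =>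
        if pvAdj es q.1 q.2 then []
        else [PySem.List.sorted [p.1, p.2, q.1, q.2] (fun x => x) false]))

-- sorted(<set of sites>) — Python compares tuples lexicographically; List Int's
-- order is lexicographic as well.
def pvSortL (xs : List (List Int)) : List (List Int) :=
  PySem.List.sorted xs (fun q => q) false

-- [a, b, c, d] if adjacent(b, c) else [a, b, d, c] (entries always have length 4)
def pvOrient (es : PySem.Set (Int × Int)) (q : List Int) : List Int :=
  match q with
  | [a, b, c, d] => if pvAdj es b c then [a, b, c, d] else [a, b, d, c]
  | _ => q

def get_adsorption_sites_alt (indices_surf : List Int) (edges_surf : List (Int × Int)) : List (String × List (List Int)) :=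
  let idx := PySem.List.sorted indices_surf (fun x => x) false
  let vset : PySem.Set Int := PySem.Set.ofList idx
  let es : PySem.Set (Int × Int) := PySem.Set.ofList (edges_surf.map pvSortPair)
  let tri := pvSortL (PySem.Set.ofList (pvTriCand es vset idx))
  let quads := pvSortL (PySem.Set.ofList (pvQuadCand es idx))
  [("top", idx.map (fun v => [v])),
   ("brg", edges_surf.map (fun e => [e.1, e.2])),
   ("3fh", tri),
   ("4fh", quads.map (pvOrient es))]

-- ===== PRECONDITION & SPEC =====
-- Pre_ excludes duplicate surface indices (A's combinations then emit repeated
-- or degenerate sites) and self-loop edges (A's within-quad degree count then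
-- counts the loop); both are degenerate for a surface graph.
def Pre_get_adsorption_sites (indices_surf : List Int) (edges_surf : List (Int × Int)) : Prop :=
  indices_surf.Nodup ∧ ∀ e ∈ edges_surf, e.1 ≠ e.2
instance (indices_surf : List Int) (edges_surf : List (Int × Int)) : Decidable (Pre_get_adsorption_sites indices_surf edges_surf) := by unfold Pre_get_adsorption_sites; infer_instance

def pvWitness_get_adsorption_sites : List Int × (List (Int × Int)) :=
  ([1, 2, 3, 4], [(1, 2), (2, 3), (3, 4), (1, 4)])

def Spec_get_adsorption_sites (indices_surf : List Int) (edges_surf : List (Int × Int)) (out : List (String × List (List Int))) : Prop := out = get_adsorption_sites_alt indices_surf edges_surf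
instance (indices_surf : List Int) (edges_surf : List (Int × Int)) (out : List (String × List (List Int))) : Decidable (Spec_get_adsorption_sites indices_surf edges_surf out) := by unfold Spec_get_adsorption_sites; infer_instance

-- ===== CLAIM (what is proved, stated in full; the proofs are below) =====
def Claim_equal_get_adsorption_sites : Prop := ∀ (indices_surf : List Int) (edges_surf : List (Int × Int)), Dom_get_adsorption_sites indices_surf edges_surf → Pre_get_adsorption_sites indices_surf edges_surf → Spec_get_adsorption_sites indices_surf edges_surf (get_adsorption_sites indices_surf edges_surf)


-- ===== LEMMAS AND PROOFS =====

-- Throughout, "lex" order on List Int is the `<` of List.instLT (Python's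
-- list/tuple comparison on ints).

-- combinations(l, k) as lists
def pvCombsL : Nat → List Int → List (List Int)
  | 0, _ => [[]]
  | _ + 1, [] => []
  | k + 1, x :: xs => (pvCombsL k xs).map (x :: ·) ++ pvCombsL (k + 1) xs

-- A's 3-fold / 4-fold filters, reread on the emitted lists
def pvP3 (es : PySem.Set (Int × Int)) : List Int → Bool
  | [a, b, c] => PySem.Set.issubset (PySem.Set.ofList [(a, b), (b, c), (a, c)]) es
  | _ => false

def pvP4 (es : PySem.Set (Int × Int)) : List Int → Bool
  | [a, b, c, d] => pvQA es (a, b, c, d)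
  | _ => false

theorem combsL_one (l : List Int) : pvCombsL 1 l = l.map (fun y => [y]) := by
  induction l with
  | nil => rfl
  | cons x xs ih => simp [pvCombsL, ih]

theorem map2_combsL (l : List Int) : (pvComb2 l).map (fun p => [p.1, p.2]) = pvCombsL 2 l := by
  induction l with
  | nil => rfl
  | cons x xs ih =>
    simp [pvComb2, pvCombsL, ih.symm, List.map_map, Function.comp_def, combsL_one]

theorem map3_combsL (l : List Int) :
    (pvComb3 l).map (fun t => [t.1, t.2.1, t.2.2]) = pvCombsL 3 l := by
  induction l with
  | nil => rfl
  | cons x xs ih =>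
    simp only [pvComb3, pvCombsL, List.map_append, ih, List.map_map]
    congr 1
    rw [← map2_combsL, List.map_map]
    rfl

theorem map4_combsL (l : List Int) :
    (pvComb4 l).map (fun q => [q.1, q.2.1, q.2.2.1, q.2.2.2]) = pvCombsL 4 l := by
  induction l with
  | nil => rfl
  | cons x xs ih =>
    simp only [pvComb4, pvCombsL, List.map_append, ih, List.map_map]
    congr 1
    rw [← map3_combsL, List.map_map]
    rfl

theorem mem_combsL (k : Nat) (l : List Int) (s : List Int) :
    s ∈ pvCombsL k l ↔ s.Sublist l ∧ s.length = k := by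
  induction l generalizing k s with
  | nil =>
    cases k with
    | zero => simp [pvCombsL, List.length_eq_zero_iff]
    | succ k =>
      simp only [pvCombsL, List.not_mem_nil, false_iff]
      rintro ⟨hs, hlen⟩
      rw [List.sublist_nil.mp hs] at hlen
      simp at hlen
  | cons x xs ih =>
    cases k with
    | zero =>
      simp only [pvCombsL, List.mem_singleton, List.length_eq_zero_iff]
      constructor
      · rintro rfl; simp
      · rintro ⟨-, rfl⟩; rfl
    | succ k =>
      simp only [pvCombsL, List.mem_append, List.mem_map, ih, List.sublist_cons_iff]
      constructor
      · rintro (⟨t, ⟨hts, htl⟩, rfl⟩ | ⟨hs, hl⟩)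
        · exact ⟨Or.inr ⟨t, rfl, hts⟩, by simp [htl]⟩
        · exact ⟨Or.inl hs, hl⟩
      · rintro ⟨hs | ⟨r, rfl, hr⟩, hl⟩
        · exact Or.inr ⟨hs, hl⟩
        · exact Or.inl ⟨r, ⟨hr, by simpa using hl⟩, rfl⟩

theorem head_mem_of_combsL (k : Nat) (l : List Int) (t : Int) (ts : List Int)
    (hmem : t :: ts ∈ pvCombsL (k + 1) l) : t ∈ l := by
  have := (mem_combsL (k + 1) l (t :: ts)).mp hmem
  exact this.1.subset (by simp)

theorem pairwise_combsL (k : Nat) (l : List Int) (hl : l.Pairwise (· < ·)) :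
    (pvCombsL k l).Pairwise (· < ·) := by
  induction l generalizing k with
  | nil => cases k <;> simp [pvCombsL]
  | cons x xs ih =>
    cases k with
    | zero => simp [pvCombsL]
    | succ k =>
      rw [pvCombsL, List.pairwise_append]
      obtain ⟨hx, hxs⟩ := List.pairwise_cons.mp hl
      refine ⟨?_, ih (k + 1) hxs, ?_⟩
      · refine List.pairwise_map.mpr ((ih k hxs).imp ?_)
        intro a b hab
        exact List.cons_lt_cons_iff.mpr (Or.inr ⟨rfl, hab⟩)
      · intro a ha b hb
        obtain ⟨t, -, rfl⟩ := List.mem_map.mp ha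
        cases b with
        | nil =>
          exfalso
          have := ((mem_combsL (k + 1) xs []).mp hb).2
          simp at this
        | cons y ys =>
          have hy : y ∈ xs := head_mem_of_combsL k xs y ys hb
          exact List.cons_lt_cons_iff.mpr (Or.inl (hx y hy))

-- a strictly increasing list of members of a strictly increasing list is a sublist
theorem sublist_of_pairwise_mem (l : List Int) (hl : l.Pairwise (· < ·)) :
    ∀ s : List Int, s.Pairwise (· < ·) → (∀ x ∈ s, x ∈ l) → s.Sublist l := by
  induction l with
  | nil =>
    intro s _ hm
    cases s with
    | nil => simp
    | cons a t => exact absurd (hm a (by simp)) (by simp)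
  | cons y l' ih =>
    intro s hs hm
    obtain ⟨hy, hl'⟩ := List.pairwise_cons.mp hl
    cases s with
    | nil => simp
    | cons a t =>
      obtain ⟨ha, ht⟩ := List.pairwise_cons.mp hs
      by_cases hay : a = y
      · subst hay
        refine List.Sublist.cons₂ a (ih hl' t ht ?_)
        intro z hz
        have hz2 : z ∈ a :: l' := hm z (by simp [hz])
        rcases List.mem_cons.mp hz2 with rfl | h
        · exact absurd (ha z hz) (lt_irrefl z)
        · exact h
      · refine List.Sublist.cons y (ih hl' (a :: t) hs ?_)
        intro z hz
        have hz2 := hm z hz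
        rcases List.mem_cons.mp hz2 with rfl | h
        · -- z = y: y ∈ s, so y = a (no) or y > a; but a ∈ y :: l' with a ≠ y gives a ∈ l', y < a
          rcases List.mem_cons.mp (hm a (by simp)) with h1 | h1
          · exact absurd h1 hay
          · have hya : z < a := hy a h1
            rcases List.mem_cons.mp hz with rfl | hzt
            · exact absurd rfl hay
            · exact absurd (ha z hzt) (by omega)
        · exact h

theorem mem_combsL_iff (k : Nat) (l : List Int) (hl : l.Pairwise (· < ·)) (s : List Int) :
    s ∈ pvCombsL k l ↔ s.length = k ∧ s.Pairwise (· < ·) ∧ ∀ x ∈ s, x ∈ l := by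
  rw [mem_combsL]
  constructor
  · rintro ⟨h1, h2⟩
    exact ⟨h2, hl.sublist h1, fun x hx => h1.subset hx⟩
  · rintro ⟨h1, h2, h3⟩
    exact ⟨sublist_of_pairwise_mem l hl s h2 h3, h1⟩

-- ----- edge-set and adjacency facts (under Pre_: no self-loops) -----

theorem es_strict (edges_surf : List (Int × Int)) (hloop : ∀ e ∈ edges_surf, e.1 ≠ e.2) :
    ∀ p ∈ PySem.Set.ofList (edges_surf.map pvSortPair), p.1 < p.2 := by
  intro p hp
  rw [PySem.Set.mem_ofList, List.mem_map] at hp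
  obtain ⟨e, he, rfl⟩ := hp
  have := hloop e he
  unfold pvSortPair
  split <;> simp <;> omega

theorem adj_of_le (es : PySem.Set (Int × Int)) (u v : Int) (h : u ≤ v) :
    pvAdj es u v = PySem.Set.contains es (u, v) := by
  simp [pvAdj, h]

theorem adj_ne (es : PySem.Set (Int × Int)) (hs : ∀ p ∈ es, p.1 < p.2) (u v : Int)
    (h : pvAdj es u v = true) : u ≠ v := by
  intro rfl
  unfold pvAdj at h
  simp only [le_refl, if_pos] at h
  have := hs (u, u) ((PySem.Set.contains_iff _ _).mp h)
  simp at this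

theorem contains_self_false (es : PySem.Set (Int × Int)) (hs : ∀ p ∈ es, p.1 < p.2) (u : Int) :
    PySem.Set.contains es (u, u) = false := by
  cases h : PySem.Set.contains es (u, u)
  · rfl
  · have := hs (u, u) ((PySem.Set.contains_iff _ _).mp h)
    simp at this

-- ----- the sorted index list -----

theorem idx_strict (indices_surf : List Int) (hnd : indices_surf.Nodup) :
    (PySem.List.sorted indices_surf (fun x => x) false).Pairwise (· < ·) := by
  have h1 : (PySem.List.sorted indices_surf (fun x => x) false).Pairwise (· ≤ ·) := by
    simpa using PySem.List.sorted_pairwise (xs := indices_surf) (key := fun x => x)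
  have h2 : (PySem.List.sorted indices_surf (fun x => x) false).Nodup :=
    (PySem.List.sorted_perm indices_surf (fun x => x) false).nodup_iff.mpr hnd
  exact (h1.and h2).imp (fun h => lt_of_le_of_ne h.1 h.2)

-- ----- A's site lists, re-read over pvCombsL -----

theorem A3_structural (es : PySem.Set (Int × Int)) (l : List Int) :
    ((pvComb3 l).filter (fun t =>
        PySem.Set.issubset (PySem.Set.ofList [(t.1, t.2.1), (t.2.1, t.2.2), (t.1, t.2.2)]) es)).map
      (fun t => [t.1, t.2.1, t.2.2])
    = (pvCombsL 3 l).filter (pvP3 es) := by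
  rw [← map3_combsL, List.filter_map]
  congr 1

theorem A4_structural (es : PySem.Set (Int × Int)) (l : List Int) :
    ((pvComb4 l).filter (pvQA es)).map (fun q => [q.1, q.2.1, q.2.2.1, q.2.2.2])
    = (pvCombsL 4 l).filter (pvP4 es) := by
  rw [← map4_combsL, List.filter_map]
  congr 1

theorem issubset_triple (es : PySem.Set (Int × Int)) (p q r : Int × Int) :
    PySem.Set.issubset (PySem.Set.ofList [p, q, r]) es
      = (PySem.Set.contains es p && (PySem.Set.contains es q && PySem.Set.contains es r)) := by
  apply Bool.eq_iff_iff.mpr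
  rw [PySem.Set.issubset_iff]
  simp [PySem.Set.mem_ofList]

-- membership in A's 3-fold list
theorem memA3 (es : PySem.Set (Int × Int)) (idx : List Int) (hidx : idx.Pairwise (· < ·))
    (s : List Int) :
    s ∈ (pvCombsL 3 idx).filter (pvP3 es) ↔
      ∃ a b c : Int, s = [a, b, c] ∧ a < b ∧ b < c ∧ a ∈ idx ∧ b ∈ idx ∧ c ∈ idx ∧
        PySem.Set.contains es (a, b) = true ∧ PySem.Set.contains es (b, c) = true ∧
        PySem.Set.contains es (a, c) = true := by
  rw [List.mem_filter, mem_combsL_iff 3 idx hidx]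
  constructor
  · rintro ⟨⟨hlen, hpw, hmem⟩, hP⟩
    match s, hlen with
    | [a, b, c], _ =>
      simp only [List.pairwise_cons, List.mem_cons, List.not_mem_nil] at hpw
      obtain ⟨hab, hc⟩ := hpw
      refine ⟨a, b, c, rfl, hab b (by simp), by simpa using hc.1, hmem a (by simp),
        hmem b (by simp), hmem c (by simp), ?_⟩
      have : pvP3 es [a, b, c] = true := hP
      rw [pvP3, issubset_triple] at this
      simp only [Bool.and_eq_true] at this
      exact ⟨this.1, this.2.1, this.2.2⟩
  · rintro ⟨a, b, c, rfl, hab, hbc, ha, hb, hc, h1, h2, h3⟩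
    refine ⟨⟨rfl, ?_, ?_⟩, ?_⟩
    · exact .cons (by intro x hx; simp at hx; rcases hx with rfl | rfl <;> omega)
        (.cons (by intro x hx; simp at hx; subst hx; omega) (.cons (by simp) .nil))
    · intro x hx
      simp at hx
      rcases hx with rfl | rfl | rfl <;> assumption
    · rw [pvP3, issubset_triple]
      simp only [Bool.and_eq_true]
      exact ⟨h1, h2, h3⟩

-- membership in B's triangle candidates
theorem memB3 (edges_surf : List (Int × Int)) (idx : List Int)
    (hs : ∀ p ∈ PySem.Set.ofList (edges_surf.map pvSortPair), p.1 < p.2) (s : List Int) :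
    s ∈ PySem.Set.ofList
        (pvTriCand (PySem.Set.ofList (edges_surf.map pvSortPair)) (PySem.Set.ofList idx) idx) ↔
      ∃ a b c : Int, s = [a, b, c] ∧ a < b ∧ b < c ∧ a ∈ idx ∧ b ∈ idx ∧ c ∈ idx ∧
        PySem.Set.contains (PySem.Set.ofList (edges_surf.map pvSortPair)) (a, b) = true ∧
        PySem.Set.contains (PySem.Set.ofList (edges_surf.map pvSortPair)) (b, c) = true ∧
        PySem.Set.contains (PySem.Set.ofList (edges_surf.map pvSortPair)) (a, c) = true := by
  set es := PySem.Set.ofList (edges_surf.map pvSortPair) with hes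
  rw [PySem.Set.mem_ofList]
  unfold pvTriCand
  simp only [List.mem_flatMap]
  constructor
  · rintro ⟨e, he, hin⟩
    rw [apply_ite (s ∈ ·)] at hin
    split at hin
    · next hvv =>
      simp only [List.mem_map, List.mem_filter, Bool.and_eq_true, decide_eq_true_eq] at hin
      obtain ⟨w, ⟨hw, ⟨hew, h1⟩, h2⟩, rfl⟩ := hin
      simp only [Bool.and_eq_true, PySem.Set.contains_iff] at hvv
      have heuv : e.1 < e.2 := hs e he
      have hce : PySem.Set.contains es (e.1, e.2) = true :=
        (PySem.Set.contains_iff _ _).mpr (by simpa using he)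
      refine ⟨e.1, e.2, w, rfl, heuv, hew, by simpa [PySem.Set.mem_ofList] using hvv.1,
        by simpa [PySem.Set.mem_ofList] using hvv.2, hw, hce, ?_, ?_⟩
      · rw [← adj_of_le es e.2 w (le_of_lt hew)]; exact h2
      · rw [← adj_of_le es e.1 w (le_of_lt (lt_trans heuv hew))]; exact h1
    · simp at hin
  · rintro ⟨a, b, c, rfl, hab, hbc, ha, hb, hc, h1, h2, h3⟩
    refine ⟨(a, b), (PySem.Set.contains_iff _ _).mp h1, ?_⟩
    rw [if_pos (by simp [PySem.Set.mem_ofList, ha, hb])]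
    simp only [List.mem_map, List.mem_filter, Bool.and_eq_true, decide_eq_true_eq]
    refine ⟨c, ⟨hc, ⟨hbc, ?_⟩, ?_⟩, rfl⟩
    · rw [adj_of_le es a c (by omega)]; exact h3
    · rw [adj_of_le es b c (le_of_lt hbc)]; exact h2

-- ----- the sort in B (Python sorts tuples lexicographically; on List Int both
-- the default `<` and the LinearOrder `<` are that order) -----

theorem sortL_eq (xs ys : List (List Int)) (hp : ys.Perm xs) (hlt : ys.Pairwise (· < ·)) :
    pvSortL xs = ys := by
  have hfun : (fun (a b : List Int) => decide (@LT.lt _ List.instLT a b))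
      = (fun a b => @decide (@LT.lt _ List.instLinearOrder.toLT a b)
          (LinearOrder.toDecidableLT a b)) := by
    funext a b
    exact decide_eq_decide.mpr Iff.rfl
  have h2 : @PySem.List.sorted (List Int) (List Int) List.instLinearOrder.toLT
      LinearOrder.toDecidableLT xs (fun q => q) false = ys :=
    PySem.List.sorted_eq_of_perm_of_pairwise_lt xs ys (fun q => q) hp (by exact hlt)
  rw [← h2]
  unfold pvSortL
  rw [@PySem.List.sorted_eq_foldl_insertBy (List Int) (List Int) List.instLT _ xs (fun q => q),
      @PySem.List.sorted_eq_foldl_insertBy (List Int) (List Int) List.instLinearOrder.toLT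
        LinearOrder.toDecidableLT xs (fun q => q), hfun]

theorem nodup_of_pairwise_lt (l : List (List Int)) (h : l.Pairwise (· < ·)) : l.Nodup :=
  h.imp (fun hlt => ne_of_lt hlt)

-- B's sorted triangle set is exactly A's filtered 3-combination list
theorem tri_eq (edges_surf : List (Int × Int)) (idx : List Int)
    (hidx : idx.Pairwise (· < ·))
    (hs : ∀ p ∈ PySem.Set.ofList (edges_surf.map pvSortPair), p.1 < p.2) :
    pvSortL (PySem.Set.ofList
        (pvTriCand (PySem.Set.ofList (edges_surf.map pvSortPair)) (PySem.Set.ofList idx) idx))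
      = (pvCombsL 3 idx).filter (pvP3 (PySem.Set.ofList (edges_surf.map pvSortPair))) := by
  apply sortL_eq
  · refine (List.perm_ext_iff_of_nodup ?_ ?_).mpr ?_
    · exact nodup_of_pairwise_lt _ ((pairwise_combsL 3 idx hidx).filter _)
    · exact PySem.Set.nodup_ofList _
    · intro s
      rw [memA3 _ idx hidx s, memB3 edges_surf idx hs s]
  · exact (pairwise_combsL 3 idx hidx).filter _

-- ----- A's 4-fold predicate, characterised as "induced 4-cycle" -----

theorem contains_orcollapse (es : PySem.Set (Int × Int))
    (hI : ∀ p ∈ es, p.1 ≤ p.2) {x y : Int} (h : x ≤ y) :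
    (PySem.Set.contains es (x, y) || PySem.Set.contains es (y, x)) = PySem.Set.contains es (x, y) := by
  cases hxy : PySem.Set.contains es (x, y) <;> simp
  intro hyx
  have hle := hI _ hyx
  simp at hle
  have hxe : x = y := le_antisymm h hle
  subst hxe
  simp at hxy
  exact hxy hyx

-- A's quad predicate, re-expressed with sorted-pair adjacency flags
theorem QA_eq (es : PySem.Set (Int × Int)) (hI : ∀ p ∈ es, p.1 ≤ p.2)
    (a b c d : Int) (hab : a ≤ b) (hbc : b ≤ c) (hcd : c ≤ d) :
    pvQA es (a, b, c, d)
      = ((pvB2i (PySem.Set.contains es (a, b)) + pvB2i (PySem.Set.contains es (a, c))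
            + pvB2i (PySem.Set.contains es (a, d)) + pvB2i (PySem.Set.contains es (b, c))
            + pvB2i (PySem.Set.contains es (b, d)) + pvB2i (PySem.Set.contains es (c, d)) == 4)
          && (pvB2i (PySem.Set.contains es (a, a)) + pvB2i (PySem.Set.contains es (a, b))
            + pvB2i (PySem.Set.contains es (a, c)) + pvB2i (PySem.Set.contains es (a, d)) == 2)
          && (pvB2i (PySem.Set.contains es (a, b)) + pvB2i (PySem.Set.contains es (b, b))
            + pvB2i (PySem.Set.contains es (b, c)) + pvB2i (PySem.Set.contains es (b, d)) == 2)
          && (pvB2i (PySem.Set.contains es (a, c)) + pvB2i (PySem.Set.contains es (b, c))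
            + pvB2i (PySem.Set.contains es (c, c)) + pvB2i (PySem.Set.contains es (c, d)) == 2)
          && (pvB2i (PySem.Set.contains es (a, d)) + pvB2i (PySem.Set.contains es (b, d))
            + pvB2i (PySem.Set.contains es (c, d)) + pvB2i (PySem.Set.contains es (d, d)) == 2)) := by
  have hac : a ≤ c := le_trans hab hbc
  have had : a ≤ d := le_trans hac hcd
  have hbd : b ≤ d := le_trans hbc hcd
  unfold pvQA
  simp only [pvComb2, List.map_cons, List.map_nil, List.map_append, List.all_cons, List.all_nil,
    List.sum_cons, List.sum_nil, List.sum_append, List.append_nil]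
  rw [contains_orcollapse es hI hab, contains_orcollapse es hI hac,
      contains_orcollapse es hI had, contains_orcollapse es hI hbc,
      contains_orcollapse es hI hbd, contains_orcollapse es hI hcd,
      Bool.or_comm (PySem.Set.contains es (b, a)), Bool.or_comm (PySem.Set.contains es (c, a)),
      Bool.or_comm (PySem.Set.contains es (d, a)), Bool.or_comm (PySem.Set.contains es (c, b)),
      Bool.or_comm (PySem.Set.contains es (d, b)), Bool.or_comm (PySem.Set.contains es (d, c))]
  rw [contains_orcollapse es hI hab, contains_orcollapse es hI hac,
      contains_orcollapse es hI had, contains_orcollapse es hI hbc,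
      contains_orcollapse es hI hbd, contains_orcollapse es hI hcd]
  simp only [Bool.or_self]
  apply Bool.eq_iff_iff.mpr
  simp only [Bool.and_eq_true, beq_iff_eq]
  constructor
  · rintro ⟨h1, ⟨h2, h3, h4, h5, -⟩⟩
    refine ⟨⟨⟨⟨by omega, by omega⟩, by omega⟩, by omega⟩, by omega⟩
  · rintro ⟨⟨⟨⟨h1, h2⟩, h3⟩, h4⟩, h5⟩
    exact ⟨by omega, by omega, by omega, by omega, by omega, trivial⟩

theorem pvB2i_false : pvB2i false = 0 := rfl

-- with the self flags zero, "4 edges and all quad-degrees 2" says exactly: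
-- the two missing pairs form one of the three perfect matchings of the quad
theorem boolQuad (ab ac ad bc bd cd : Bool) :
    ((pvB2i ab + pvB2i ac + pvB2i ad + pvB2i bc + pvB2i bd + pvB2i cd == 4)
      && ((0 : Int) + pvB2i ab + pvB2i ac + pvB2i ad == 2)
      && (pvB2i ab + 0 + pvB2i bc + pvB2i bd == 2)
      && (pvB2i ac + pvB2i bc + 0 + pvB2i cd == 2)
      && (pvB2i ad + pvB2i bd + pvB2i cd + 0 == 2))
    = ((!ab && !cd && ac && ad && bc && bd)
      || (!ac && !bd && ab && ad && bc && cd)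
      || (!ad && !bc && ab && ac && bd && cd)) := by
  revert ab ac ad bc bd cd
  decide

-- pvQA on a sorted quad of a loop-free edge set is the 4-cycle condition
theorem QA_char (es : PySem.Set (Int × Int)) (hs : ∀ p ∈ es, p.1 < p.2)
    (a b c d : Int) (hab : a < b) (hbc : b < c) (hcd : c < d) :
    pvQA es (a, b, c, d)
      = ((!PySem.Set.contains es (a, b) && !PySem.Set.contains es (c, d)
            && PySem.Set.contains es (a, c) && PySem.Set.contains es (a, d)
            && PySem.Set.contains es (b, c) && PySem.Set.contains es (b, d))
        || (!PySem.Set.contains es (a, c) && !PySem.Set.contains es (b, d)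
            && PySem.Set.contains es (a, b) && PySem.Set.contains es (a, d)
            && PySem.Set.contains es (b, c) && PySem.Set.contains es (c, d))
        || (!PySem.Set.contains es (a, d) && !PySem.Set.contains es (b, c)
            && PySem.Set.contains es (a, b) && PySem.Set.contains es (a, c)
            && PySem.Set.contains es (b, d) && PySem.Set.contains es (c, d))) := by
  rw [QA_eq es (fun p hp => le_of_lt (hs p hp)) a b c d (le_of_lt hab) (le_of_lt hbc)
      (le_of_lt hcd), contains_self_false es hs a, contains_self_false es hs b,
      contains_self_false es hs c, contains_self_false es hs d, pvB2i_false,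
      boolQuad]

-- membership in A's 4-fold list (before the reordering pass)
theorem memA4 (es : PySem.Set (Int × Int)) (idx : List Int) (hidx : idx.Pairwise (· < ·))
    (s : List Int) :
    s ∈ (pvCombsL 4 idx).filter (pvP4 es) ↔
      ∃ a b c d : Int, s = [a, b, c, d] ∧ a < b ∧ b < c ∧ c < d ∧
        a ∈ idx ∧ b ∈ idx ∧ c ∈ idx ∧ d ∈ idx ∧ pvQA es (a, b, c, d) = true := by
  rw [List.mem_filter, mem_combsL_iff 4 idx hidx]
  constructor
  · rintro ⟨⟨hlen, hpw, hmem⟩, hP⟩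
    match s, hlen with
    | [a, b, c, d], _ =>
      simp only [List.pairwise_cons, List.mem_cons, List.not_mem_nil] at hpw
      refine ⟨a, b, c, d, rfl, hpw.1 b (by simp), hpw.2.1 c (by simp), ?_,
        hmem a (by simp), hmem b (by simp), hmem c (by simp), hmem d (by simp), hP⟩
      exact hpw.2.2.1 d (by simp)
  · rintro ⟨a, b, c, d, rfl, hab, hbc, hcd, ha, hb, hc, hd, hQ⟩
    refine ⟨⟨rfl, ?_, ?_⟩, hQ⟩
    · exact .cons (by intro x hx; simp at hx; rcases hx with rfl | rfl | rfl <;> omega)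
        (.cons (by intro x hx; simp at hx; rcases hx with rfl | rfl <;> omega)
          (.cons (by intro x hx; simp at hx; subst hx; omega) (.cons (by simp) .nil)))
    · intro x hx
      simp at hx
      rcases hx with rfl | rfl | rfl | rfl <;> assumption

-- the (u, v) pairs produced by the suffix loops of a strictly increasing list
theorem mem_pairsB (l : List Int) (hl : l.Pairwise (· < ·)) (u v : Int) :
    (u, v) ∈ pvPairsB l ↔ u ∈ l ∧ v ∈ l ∧ u < v := by
  induction l with
  | nil => simp [pvPairsB]
  | cons x xs ih =>
    obtain ⟨hx, hxs⟩ := List.pairwise_cons.mp hl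
    simp only [pvPairsB, List.mem_append, List.mem_map, ih hxs, List.mem_cons]
    constructor
    · rintro (⟨w, hw, heq⟩ | ⟨hu, hv, huv⟩)
      · obtain ⟨h1, h2⟩ := Prod.mk.inj heq
        subst h1; subst h2
        exact ⟨Or.inl rfl, Or.inr hw, hx _ hw⟩
      · exact ⟨Or.inr hu, Or.inr hv, huv⟩
    · rintro ⟨hu | hu, hv | hv, huv⟩
      · omega
      · exact Or.inl ⟨v, hv, by rw [hu]⟩
      · subst hv
        exact absurd (hx u hu) (by omega)
      · exact Or.inr ⟨hu, hv, huv⟩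

-- membership in B's 4-fold candidates
theorem memB4 (es : PySem.Set (Int × Int)) (idx : List Int) (hidx : idx.Pairwise (· < ·))
    (s : List Int) :
    s ∈ PySem.Set.ofList (pvQuadCand es idx) ↔
      ∃ u v x y : Int, u ∈ idx ∧ v ∈ idx ∧ u < v ∧ pvAdj es u v = false ∧
        x ∈ idx ∧ y ∈ idx ∧ x < y ∧
        pvAdj es u x = true ∧ pvAdj es v x = true ∧
        pvAdj es u y = true ∧ pvAdj es v y = true ∧
        pvAdj es x y = false ∧
        s = PySem.List.sorted [u, v, x, y] (fun t => t) false := by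
  rw [PySem.Set.mem_ofList]
  unfold pvQuadCand
  simp only [List.mem_flatMap]
  constructor
  · rintro ⟨p, hp, hin⟩
    rcases huv : pvAdj es p.1 p.2 with _ | _
    · rw [if_neg (by simp [huv])] at hin
      simp only [List.mem_flatMap] at hin
      obtain ⟨q, hq, hin2⟩ := hin
      rcases hq12 : pvAdj es q.1 q.2 with _ | _
      · rw [if_neg (by simp [hq12])] at hin2
        simp only [List.mem_singleton] at hin2
        have hpm := (mem_pairsB idx hidx p.1 p.2).mp (by simpa using hp)
        have hcomm : (idx.filter (fun w => pvAdj es p.1 w && pvAdj es p.2 w)).Pairwise (· < ·) :=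
          hidx.filter _
        obtain ⟨hx', hy', hxy⟩ := (mem_pairsB _ hcomm q.1 q.2).mp (by simpa using hq)
        rw [List.mem_filter, Bool.and_eq_true] at hx' hy'
        exact ⟨p.1, p.2, q.1, q.2, hpm.1, hpm.2.1, hpm.2.2, huv, hx'.1, hy'.1, hxy,
          hx'.2.1, hx'.2.2, hy'.2.1, hy'.2.2, hq12, hin2⟩
      · rw [if_pos (by simp [hq12])] at hin2
        simp at hin2
    · rw [if_pos (by simp [huv])] at hin
      simp at hin
  · rintro ⟨u, v, x, y, hu, hv, huv, nuv, hx, hy, hxy, aux, avx, auy, avy, nxy, rfl⟩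
    refine ⟨(u, v), (mem_pairsB idx hidx u v).mpr ⟨hu, hv, huv⟩, ?_⟩
    rw [if_neg (by simp [nuv])]
    simp only [List.mem_flatMap]
    have hcomm : (idx.filter (fun w => pvAdj es u w && pvAdj es v w)).Pairwise (· < ·) :=
      hidx.filter _
    refine ⟨(x, y), (mem_pairsB _ hcomm x y).mpr ⟨?_, ?_, hxy⟩, ?_⟩
    · rw [List.mem_filter]; simp [hx, aux, avx]
    · rw [List.mem_filter]; simp [hy, auy, avy]
    · rw [if_neg (by simp [nxy])]
      simp

theorem pw4le (a b c d : Int) (h1 : a ≤ b) (h2 : b ≤ c) (h3 : c ≤ d) :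
    ([a, b, c, d] : List Int).Pairwise (· ≤ ·) :=
  .cons (by intro x hx; simp at hx; rcases hx with rfl | rfl | rfl <;> omega)
    (.cons (by intro x hx; simp at hx; rcases hx with rfl | rfl <;> omega)
      (.cons (by intro x hx; simp at hx; subst hx; omega) (.cons (by simp) .nil)))

theorem sorted4 (u v x y : Int) (ys : List Int) (hp : ys.Perm [u, v, x, y])
    (hle : ys.Pairwise (· ≤ ·)) :
    PySem.List.sorted [u, v, x, y] (fun t => t) false = ys :=
  PySem.List.sorted_id_eq_of_perm_of_pairwise _ _ hp hle

theorem adj_symm (es : PySem.Set (Int × Int)) (u v : Int) : pvAdj es u v = pvAdj es v u := by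
  unfold pvAdj
  rcases le_total u v with h | h
  · rcases eq_or_lt_of_le h with rfl | h'
    · rfl
    · rw [if_pos h, if_neg (not_le.mpr h')]
  · rcases eq_or_lt_of_le h with rfl | h'
    · rfl
    · rw [if_neg (not_le.mpr h'), if_pos h]

-- pvQA on a sorted quad, written with the (symmetric) adjacency test
theorem QA_adj_char (es : PySem.Set (Int × Int)) (hs : ∀ p ∈ es, p.1 < p.2)
    (a b c d : Int) (hab : a < b) (hbc : b < c) (hcd : c < d) :
    pvQA es (a, b, c, d)
      = ((!pvAdj es a b && !pvAdj es c d && pvAdj es a c && pvAdj es a d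
            && pvAdj es b c && pvAdj es b d)
        || (!pvAdj es a c && !pvAdj es b d && pvAdj es a b && pvAdj es a d
            && pvAdj es b c && pvAdj es c d)
        || (!pvAdj es a d && !pvAdj es b c && pvAdj es a b && pvAdj es a c
            && pvAdj es b d && pvAdj es c d)) := by
  rw [QA_char es hs a b c d hab hbc hcd,
      ← adj_of_le es a b hab.le, ← adj_of_le es b c hbc.le, ← adj_of_le es c d hcd.le,
      ← adj_of_le es a c (by omega : a ≤ c), ← adj_of_le es a d (by omega : a ≤ d),
      ← adj_of_le es b d (by omega : b ≤ d)]

-- the central equivalence: A's filtered 4-combinations are exactly B's candidates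
theorem quad_mem_iff (es : PySem.Set (Int × Int)) (idx : List Int)
    (hidx : idx.Pairwise (· < ·)) (hs : ∀ p ∈ es, p.1 < p.2) (s : List Int) :
    s ∈ (pvCombsL 4 idx).filter (pvP4 es) ↔ s ∈ PySem.Set.ofList (pvQuadCand es idx) := by
  rw [memA4 es idx hidx s, memB4 es idx hidx s]
  constructor
  · rintro ⟨a, b, c, d, rfl, hab, hbc, hcd, ha, hb, hc, hd, hQ⟩
    rw [QA_adj_char es hs a b c d hab hbc hcd] at hQ
    simp only [Bool.or_eq_true, Bool.and_eq_true, Bool.not_eq_true'] at hQ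
    rcases hQ with (⟨⟨⟨⟨⟨e1, e2⟩, e3⟩, e4⟩, e5⟩, e6⟩ | ⟨⟨⟨⟨⟨e1, e2⟩, e3⟩, e4⟩, e5⟩, e6⟩) |
      ⟨⟨⟨⟨⟨e1, e2⟩, e3⟩, e4⟩, e5⟩, e6⟩
    · -- non-edges {a,b} and {c,d}: diagonals (a,b) and (c,d)
      exact ⟨a, b, c, d, ha, hb, hab, e1, hc, hd, hcd, e3, e5, e4, e6, e2,
        (sorted4 a b c d _ (.refl _) (pw4le a b c d hab.le hbc.le hcd.le)).symm⟩
    · -- non-edges {a,c} and {b,d}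
      refine ⟨a, c, b, d, ha, hc, by omega, e1, hb, hd, by omega, e3,
        by rw [adj_symm es c b]; exact e5, e4, e6, e2, ?_⟩
      exact (sorted4 a c b d _ (.cons a (.swap c b [d]))
        (pw4le a b c d hab.le hbc.le hcd.le)).symm
    · -- non-edges {a,d} and {b,c}
      refine ⟨a, d, b, c, ha, hd, by omega, e1, hb, hc, hbc, e3,
        by rw [adj_symm es d b]; exact e5, e4,
        by rw [adj_symm es d c]; exact e6, e2, ?_⟩
      refine (sorted4 a d b c _ (.cons a ?_) (pw4le a b c d hab.le hbc.le hcd.le)).symm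
      exact (List.Perm.cons b (.swap d c [])).trans (.swap d b [c])
  · rintro ⟨u, v, x, y, hu, hv, huv, nuv, hx, hy, hxy, aux, avx, auy, avy, nxy, rfl⟩
    have hux := adj_ne es hs u x aux
    have huy := adj_ne es hs u y auy
    have hvx := adj_ne es hs v x avx
    have hvy := adj_ne es hs v y avy
    -- six interleavings of u < v and x < y
    rcases lt_trichotomy v x with h1 | heq | h1
    · -- u < v < x < y
      refine ⟨u, v, x, y, sorted4 u v x y _ (.refl _)
          (pw4le u v x y huv.le h1.le hxy.le),
        huv, h1, hxy, hu, hv, hx, hy, ?_⟩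
      rw [QA_adj_char es hs u v x y huv h1 hxy]
      simp only [Bool.or_eq_true, Bool.and_eq_true, Bool.not_eq_true']
      exact Or.inl (Or.inl ⟨⟨⟨⟨⟨nuv, nxy⟩, aux⟩, auy⟩, avx⟩, avy⟩)
    · exact absurd heq hvx
    · rcases lt_trichotomy u x with h2 | heq | h2
      · -- u < x; and x < v
        rcases lt_trichotomy v y with h3 | heq | h3
        · -- u < x < v < y
          refine ⟨u, x, v, y, sorted4 u v x y _ (.cons u (.swap v x [y]))
              (pw4le u x v y h2.le h1.le h3.le),
            h2, h1, h3, hu, hx, hv, hy, ?_⟩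
          rw [QA_adj_char es hs u x v y h2 h1 h3]
          simp only [Bool.or_eq_true, Bool.and_eq_true, Bool.not_eq_true']
          exact Or.inl (Or.inr ⟨⟨⟨⟨⟨nuv, nxy⟩, aux⟩, auy⟩,
            by rw [adj_symm es x v]; exact avx⟩, avy⟩)
        · exact absurd heq hvy
        · -- u < x < y < v
          refine ⟨u, x, y, v, ?_, h2, hxy, h3, hu, hx, hy, hv, ?_⟩
          · refine sorted4 u v x y _ (List.Perm.cons u ?_)
              (pw4le u x y v h2.le hxy.le h3.le)
            exact (List.Perm.cons x (.swap v y [])).trans (.swap v x [y])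
          rw [QA_adj_char es hs u x y v h2 hxy h3]
          simp only [Bool.or_eq_true, Bool.and_eq_true, Bool.not_eq_true']
          exact Or.inr ⟨⟨⟨⟨⟨nuv, nxy⟩, aux⟩, auy⟩,
            by rw [adj_symm es x v]; exact avx⟩, by rw [adj_symm es y v]; exact avy⟩
      · exact absurd heq hux
      · -- x < u
        rcases lt_trichotomy v y with h3 | heq | h3
        · -- x < u < v < y
          refine ⟨x, u, v, y, ?_, h2, huv, h3, hx, hu, hv, hy, ?_⟩
          · refine sorted4 u v x y _ ?_ (pw4le x u v y h2.le huv.le h3.le)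
            exact (List.Perm.swap u x [v, y]).trans (List.Perm.cons u (.swap v x [y]))
          rw [QA_adj_char es hs x u v y h2 huv h3]
          simp only [Bool.or_eq_true, Bool.and_eq_true, Bool.not_eq_true']
          exact Or.inr ⟨⟨⟨⟨⟨nxy, nuv⟩, by rw [adj_symm es x u]; exact aux⟩,
            by rw [adj_symm es x v]; exact avx⟩, auy⟩, avy⟩
        · exact absurd heq hvy
        · -- x < u, y < v: either x < u < y < v or x < y < u < v
          rcases lt_trichotomy u y with h4 | heq | h4
          · -- x < u < y < v
            refine ⟨x, u, y, v, ?_, h2, h4, h3, hx, hu, hy, hv, ?_⟩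
            · refine sorted4 u v x y _ ?_ (pw4le x u y v h2.le h4.le h3.le)
              exact (List.Perm.swap u x [y, v]).trans (List.Perm.cons u
                ((List.Perm.cons x (.swap v y [])).trans (.swap v x [y])))
            rw [QA_adj_char es hs x u y v h2 h4 h3]
            simp only [Bool.or_eq_true, Bool.and_eq_true, Bool.not_eq_true']
            exact Or.inl (Or.inr ⟨⟨⟨⟨⟨nxy, nuv⟩,
              by rw [adj_symm es x u]; exact aux⟩,
              by rw [adj_symm es x v]; exact avx⟩, auy⟩,
              by rw [adj_symm es y v]; exact avy⟩)
          · exact absurd heq huy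
          · -- x < y < u < v
            refine ⟨x, y, u, v, ?_, hxy, h4, huv, hx, hy, hu, hv, ?_⟩
            · exact sorted4 u v x y _ (List.perm_append_comm (l₁ := [x, y]) (l₂ := [u, v]))
                (pw4le x y u v hxy.le h4.le huv.le)
            rw [QA_adj_char es hs x y u v hxy h4 huv]
            simp only [Bool.or_eq_true, Bool.and_eq_true, Bool.not_eq_true']
            exact Or.inl (Or.inl ⟨⟨⟨⟨⟨nxy, nuv⟩,
              by rw [adj_symm es x u]; exact aux⟩,
              by rw [adj_symm es x v]; exact avx⟩,
              by rw [adj_symm es y u]; exact auy⟩,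
              by rw [adj_symm es y v]; exact avy⟩)

-- B's sorted quad set is exactly A's filtered 4-combination list
theorem quad_eq (es : PySem.Set (Int × Int)) (idx : List Int)
    (hidx : idx.Pairwise (· < ·)) (hs : ∀ p ∈ es, p.1 < p.2) :
    pvSortL (PySem.Set.ofList (pvQuadCand es idx)) = (pvCombsL 4 idx).filter (pvP4 es) := by
  apply sortL_eq
  · refine (List.perm_ext_iff_of_nodup ?_ ?_).mpr ?_
    · exact nodup_of_pairwise_lt _ ((pairwise_combsL 4 idx hidx).filter _)
    · exact PySem.Set.nodup_ofList _
    · exact quad_mem_iff es idx hidx hs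
  · exact (pairwise_combsL 4 idx hidx).filter _

-- the reordering pass of A and the orientation step of B agree on the quads
theorem orient_map (es : PySem.Set (Int × Int)) (idx : List Int)
    (hidx : idx.Pairwise (· < ·)) :
    ((pvCombsL 4 idx).filter (pvP4 es)).map (pvReorder es)
      = ((pvCombsL 4 idx).filter (pvP4 es)).map (pvOrient es) := by
  apply List.map_congr_left
  intro s hs'
  obtain ⟨a, b, c, d, rfl, -, hbc, -, -⟩ := (memA4 es idx hidx s).mp hs'
  simp [pvReorder, pvOrient, adj_of_le es b c hbc.le]

-- the dict-building chain of port A, evaluated on its literal keys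
theorem dict_step (T Bg F3 F4 : List (List Int)) (g : List Int → List Int) :
    ((((((PySem.Dict.empty : PySem.Dict String (List (List Int))).insert "top" T).insert "brg" Bg).insert "3fh" F3).insert "4fh" F4).insert "4fh"
        (List.map g ((((((((PySem.Dict.empty : PySem.Dict String (List (List Int))).insert "top" T).insert "brg" Bg).insert "3fh" F3).insert "4fh" F4).get? "4fh")).getD []))).items
      = [("top", T), ("brg", Bg), ("3fh", F3), ("4fh", List.map g F4)] := rfl

-- ===== VERDICT (by name: the statement is the Claim_ definition above) =====
theorem get_adsorption_sites_spec : Claim_equal_get_adsorption_sites := by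
  intro indices_surf edges_surf _ hpre
  obtain ⟨hnd, hloop⟩ := hpre
  unfold Spec_get_adsorption_sites
  have hs := es_strict edges_surf hloop
  have hidx := idx_strict indices_surf hnd
  simp only [get_adsorption_sites, get_adsorption_sites_alt]
  rw [dict_step]
  rw [A3_structural, A4_structural,
      tri_eq edges_surf (PySem.List.sorted indices_surf (fun x => x) false) hidx hs,
      quad_eq (PySem.Set.ofList (edges_surf.map pvSortPair))
        (PySem.List.sorted indices_surf (fun x => x) false) hidx hs,
      orient_map (PySem.Set.ofList (edges_surf.map pvSortPair))
        (PySem.List.sorted indices_surf (fun x => x) false) hidx]
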